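-- pv_equiv track=rewrite | github.com/designingEmergence/notion-discord-bot | src/rag/utils.py | map_chunks_by_parent
-- ===== SOURCE A (Python) =====
-- from typing import List, Dict, Any, Optional, Tuple, Set, Union
--
-- def map_chunks_by_parent(ids: List[str], metadatas: List[Dict]) -> Tuple[Dict[str, List[str]], Dict[str, Set[str]], Set[str]]:
--     """Create mappings of chunks to parent documents."""
--     chunk_parents = {}
--     chunk_ids_by_parent = {}
--     all_chunk_ids = set()
--
--     for id, meta in zip(ids, metadatas):
--         parent_id = meta.get("parent_id")
--         if parent_id:
--             #Track chunks by their parent document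
--             if parent_id not in chunk_parents:
--                 chunk_parents[parent_id] = []
--                 chunk_ids_by_parent[parent_id] = set()
--             chunk_parents[parent_id].append(id)
--             chunk_ids_by_parent[parent_id].add(id)
--             all_chunk_ids.add(id)
--
--     return chunk_parents, chunk_ids_by_parent, all_chunk_ids
-- ===== SOURCE B (Python) =====
-- def map_chunks_by_parent(ids, metadatas):
--     """Create mappings of chunks to parent documents.
--
--     Different algorithm: first collect the distinct truthy parent ids in order of
--     first appearance, then build each output by a separate scan per parent
--     (nested scans) instead of one fused hash-grouping pass.
--     """
--     pairs = [(i, m.get("parent_id")) for i, m in zip(ids, metadatas)]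
--     parents = []
--     for _, p in pairs:
--         if p and p not in parents:
--             parents.append(p)
--     chunk_parents = {p: [i for i, q in pairs if q == p] for p in parents}
--     chunk_ids_by_parent = {p: set(chunk_parents[p]) for p in parents}
--     all_chunk_ids = {i for i, q in pairs if q}
--     return chunk_parents, chunk_ids_by_parent, all_chunk_ids
-- ===== Notes on version B (the rewrite author's own statement) =====
-- stated objective: alternative
-- what changed: A builds all three outputs simultaneously in one fused hash-grouping loop with explicit first-seen initialisation; B first collects the distinct truthy parent ids in first-appearance order and then builds each output by separate per-parent filtering scans over the (id, parent) pairs (nested scans), trading A's single O(n) pass for a clearer staged construction.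
import Mathlib
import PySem

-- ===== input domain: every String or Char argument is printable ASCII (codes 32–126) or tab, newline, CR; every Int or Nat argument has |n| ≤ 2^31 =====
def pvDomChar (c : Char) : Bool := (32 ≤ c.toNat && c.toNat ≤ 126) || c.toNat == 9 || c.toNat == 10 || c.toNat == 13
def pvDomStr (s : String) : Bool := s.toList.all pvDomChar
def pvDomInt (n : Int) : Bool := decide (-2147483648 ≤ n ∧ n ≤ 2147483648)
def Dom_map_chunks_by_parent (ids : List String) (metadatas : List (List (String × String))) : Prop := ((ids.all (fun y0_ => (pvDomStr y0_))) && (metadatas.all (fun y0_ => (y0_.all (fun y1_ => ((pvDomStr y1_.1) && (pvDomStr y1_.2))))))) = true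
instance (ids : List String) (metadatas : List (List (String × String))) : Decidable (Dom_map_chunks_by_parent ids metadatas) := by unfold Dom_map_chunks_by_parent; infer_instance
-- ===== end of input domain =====

-- B replaces A's fused single-pass hash grouping by a first pass collecting distinct parents in first-appearance order followed by separate per-parent filtering scans; objective: alternative (same results, staged nested-scan construction).


-- meta.get("parent_id") (the same Python expression occurs in both programs)
def pvParentOf (m : List (String × String)) : Option String :=
  (PySem.Dict.mk m).get? "parent_id"

-- ===== PORT A =====
-- A's loop body: one fused step updating chunk_parents, chunk_ids_by_parent and all_chunk_ids
def pvStepA (st : PySem.Dict String (List String) × PySem.Dict String (PySem.Set String) × PySem.Set String)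
    (x : String × List (String × String)) :
    PySem.Dict String (List String) × PySem.Dict String (PySem.Set String) × PySem.Set String :=
  match pvParentOf x.2 with
  | some parent_id =>
    if parent_id ≠ "" then
      let cp := st.1
      let cibp := st.2.1
      let all := st.2.2
      let (cp, cibp) :=
        if ¬ cp.contains parent_id then
          (cp.insert parent_id ([] : List String), cibp.insert parent_id (PySem.Set.empty : PySem.Set String))
        else (cp, cibp)
      (cp.modify parent_id [] (fun v => v ++ [x.1]),
       cibp.modify parent_id PySem.Set.empty (fun v => PySem.Set.add v x.1),
       PySem.Set.add all x.1)
    else st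
  | none => st

def map_chunks_by_parent (ids : List String) (metadatas : List (List (String × String))) : (List (String × List String)) × (List (String × List String)) × List String :=
  let r := (ids.zip metadatas).foldl pvStepA
    ((PySem.Dict.empty : PySem.Dict String (List String)),
     (PySem.Dict.empty : PySem.Dict String (PySem.Set String)),
     (PySem.Set.empty : PySem.Set String))
  (r.1.items, r.2.1.items, r.2.2)

-- ===== PORT B =====
-- truthiness of meta.get("parent_id"): not None and not ""
def pvTruthy (o : Option String) : Bool :=
  match o with
  | some p => p ≠ ""
  | none => false

def map_chunks_by_parent_alt (ids : List String) (metadatas : List (List (String × String))) : (List (String × List String)) × (List (String × List String)) × List String :=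
  let pairs := (ids.zip metadatas).map (fun x => (x.1, pvParentOf x.2))
  -- for _, p in pairs: if p and p not in parents: parents.append(p)
  let parents := pairs.foldl (fun acc x =>
      match x.2 with
      | some p => if p ≠ "" ∧ p ∉ acc then acc ++ [p] else acc
      | none => acc) ([] : List String)
  -- {p: [i for i, q in pairs if q == p] for p in parents}
  let chunk_parents := parents.map (fun p =>
      (p, (pairs.filter (fun x => x.2 == some p)).map (fun x => x.1)))
  -- {p: set(chunk_parents[p]) for p in parents}
  let chunk_ids_by_parent := parents.map (fun p =>
      (p, (PySem.Set.ofList ((PySem.Dict.mk chunk_parents).getD p []) : PySem.Set String)))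
  -- {i for i, q in pairs if q}
  let all_chunk_ids : PySem.Set String :=
    PySem.Set.ofList ((pairs.filter (fun x => pvTruthy x.2)).map (fun x => x.1))
  (chunk_parents, chunk_ids_by_parent, all_chunk_ids)

-- ===== PRECONDITION & SPEC =====
def Spec_map_chunks_by_parent (ids : List String) (metadatas : List (List (String × String))) (out : (List (String × List String)) × (List (String × List String)) × List String) : Prop := out = map_chunks_by_parent_alt ids metadatas
instance (ids : List String) (metadatas : List (List (String × String))) (out : (List (String × List String)) × (List (String × List String)) × List String) : Decidable (Spec_map_chunks_by_parent ids metadatas out) := by unfold Spec_map_chunks_by_parent; infer_instance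

-- ===== CLAIM (what is proved, stated in full; the proofs are below) =====
def Claim_equal_map_chunks_by_parent : Prop := ∀ (ids : List String) (metadatas : List (List (String × String))), Dom_map_chunks_by_parent ids metadatas → Spec_map_chunks_by_parent ids metadatas (map_chunks_by_parent ids metadatas)

-- ===== LEMMAS AND PROOFS =====

-- the (parent, id) pairs A actually groups: truthy-parent entries of zip(ids, metadatas)
def pvTPairs (l : List (String × List (String × String))) : List (String × String) :=
  l.filterMap (fun x =>
    match pvParentOf x.2 with
    | some p => if p ≠ "" then some (p, x.1) else none
    | none => none)

theorem pvTPairs_cons_none (x : String × List (String × String)) (l : List (String × List (String × String)))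
    (h : pvParentOf x.2 = none) : pvTPairs (x :: l) = pvTPairs l := by
  simp [pvTPairs, h]

theorem pvTPairs_cons_empty (x : String × List (String × String)) (l : List (String × List (String × String)))
    (h : pvParentOf x.2 = some "") : pvTPairs (x :: l) = pvTPairs l := by
  simp [pvTPairs, h]

theorem pvTPairs_cons_some (x : String × List (String × String)) (l : List (String × List (String × String)))
    (p : String) (h : pvParentOf x.2 = some p) (he : p ≠ "") :
    pvTPairs (x :: l) = (p, x.1) :: pvTPairs l := by
  simp [pvTPairs, h, he]

-- the list-map component of A's fused step, on its own
def pvStepL (cp : PySem.Dict String (List String)) (x : String × List (String × String)) :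
    PySem.Dict String (List String) :=
  match pvParentOf x.2 with
  | some p =>
    if p ≠ "" then (if ¬ cp.contains p then cp.insert p [] else cp).modify p [] (fun v => v ++ [x.1])
    else cp
  | none => cp

-- value-wise image of the list-map under set(·)
def pvMv (d : PySem.Dict String (List String)) : PySem.Dict String (PySem.Set String) :=
  PySem.Dict.mk (d.items.map (fun kv => (kv.1, PySem.Set.ofList kv.2)))

theorem pvMv_contains (d : PySem.Dict String (List String)) (p : String) :
    (pvMv d).contains p = d.contains p := by
  simp [pvMv, PySem.Dict.contains, List.any_map, Function.comp_def]

theorem pvMv_get? (d : PySem.Dict String (List String)) (p : String) :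
    (pvMv d).get? p = (d.get? p).map PySem.Set.ofList := by
  simp [pvMv, PySem.Dict.get?, List.find?_map, Function.comp_def]

theorem pvMv_getD (d : PySem.Dict String (List String)) (p : String) :
    (pvMv d).getD p PySem.Set.empty = PySem.Set.ofList (d.getD p []) := by
  simp only [PySem.Dict.getD_eq_get?_getD, pvMv_get?]
  cases d.get? p <;> rfl

theorem pvMv_insert (d : PySem.Dict String (List String)) (p : String) (v : List String) :
    pvMv (d.insert p v) = (pvMv d).insert p (PySem.Set.ofList v) := by
  simp only [PySem.Dict.insert, pvMv_contains]
  by_cases h : d.contains p = true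
  · simp only [h, if_pos]
    unfold pvMv
    simp only [List.map_map]
    congr 1
    apply List.map_congr_left
    intro kv _
    by_cases hk : kv.1 = p <;> simp [hk]
  · simp only [h, if_neg, Bool.not_eq_true]
    simp [pvMv]

theorem pvOfList_append (v : List String) (a : String) :
    PySem.Set.ofList (v ++ [a]) = PySem.Set.add (PySem.Set.ofList v) a := by
  simp [PySem.Set.ofList, List.foldl_append]

theorem pvMv_modify (d : PySem.Dict String (List String)) (p : String) (a : String) :
    pvMv (d.modify p [] (fun v => v ++ [a]))
      = (pvMv d).modify p PySem.Set.empty (fun v => PySem.Set.add v a) := by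
  simp only [PySem.Dict.modify, pvMv_insert, pvOfList_append, pvMv_getD]

-- one fused step of A = its list-map component, with the other two components derived
theorem pvStep_eq (cp : PySem.Dict String (List String)) (s : PySem.Set String)
    (x : String × List (String × String)) :
    pvStepA (cp, pvMv cp, s) x
      = (pvStepL cp x, pvMv (pvStepL cp x),
         if pvTruthy (pvParentOf x.2) then PySem.Set.add s x.1 else s) := by
  unfold pvStepA pvStepL pvTruthy
  cases hp : pvParentOf x.2 with
  | none => rfl
  | some p =>
    by_cases he : p = ""
    · simp [he]
    · simp only [ne_eq, he, not_false_eq_true, if_true, decide_eq_true_eq]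
      by_cases hc : cp.contains p = true
      · simp only [hc, not_true, if_false]
        rw [pvMv_modify]
      · simp only [hc, Bool.false_eq_true, not_false_eq_true, if_true]
        rw [pvMv_modify, pvMv_insert]
        rfl

-- A's explicit first-seen initialisation is absorbed by modify's default
theorem pvStepL_eq_modify (cp : PySem.Dict String (List String)) (x : String × List (String × String)) :
    pvStepL cp x
      = match pvParentOf x.2 with
        | some p => if p ≠ "" then cp.modify p [] (fun v => v ++ [x.1]) else cp
        | none => cp := by
  unfold pvStepL
  cases pvParentOf x.2 with
  | none => rfl
  | some p =>
    by_cases he : p = ""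
    · simp [he]
    · simp only [ne_eq, he, not_false_eq_true, if_true]
      by_cases hc : cp.contains p = true
      · simp [hc]
      · simp only [hc, Bool.false_eq_true, not_false_eq_true, if_true]
        have hg : cp.getD p [] = [] :=
          PySem.Dict.getD_of_not_contains cp [] (by simpa using hc)
        simp only [PySem.Dict.modify, PySem.Dict.getD_insert_self,
          PySem.Dict.insert_insert_self, hg]

-- A's list-map loop = the plain grouping fold over the truthy (parent, id) pairs
theorem pvFoldL_eq (l : List (String × List (String × String))) (cp : PySem.Dict String (List String)) :
    l.foldl pvStepL cp
      = (pvTPairs l).foldl (fun d q => d.modify q.1 [] (fun v => v ++ [q.2])) cp := by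
  induction l generalizing cp with
  | nil => rfl
  | cons x l ih =>
    rw [List.foldl_cons, pvStepL_eq_modify]
    cases hp : pvParentOf x.2 with
    | none => rw [pvTPairs_cons_none x l hp]; exact ih cp
    | some p =>
      dsimp only
      by_cases he : p = ""
      · subst he
        rw [if_neg (by simp), pvTPairs_cons_empty x l hp]
        exact ih cp
      · rw [if_pos he, pvTPairs_cons_some x l p hp he, List.foldl_cons]
        exact ih _

-- B's parents loop = ordered dedup of the truthy parents
theorem pvParents_eq (l : List (String × List (String × String))) (acc : List String) :
    (l.map (fun x => (x.1, pvParentOf x.2))).foldl (fun acc x =>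
        match x.2 with
        | some p => if p ≠ "" ∧ p ∉ acc then acc ++ [p] else acc
        | none => acc) acc
      = ((pvTPairs l).map (fun q => q.1)).foldl PySem.Set.add acc := by
  induction l generalizing acc with
  | nil => rfl
  | cons x l ih =>
    rw [List.map_cons, List.foldl_cons]
    cases hp : pvParentOf x.2 with
    | none =>
      dsimp only
      rw [pvTPairs_cons_none x l hp]
      exact ih acc
    | some p =>
      dsimp only
      by_cases he : p = ""
      · subst he
        rw [if_neg (by simp), pvTPairs_cons_empty x l hp]
        exact ih acc
      · rw [pvTPairs_cons_some x l p hp he, List.map_cons, List.foldl_cons]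
        have hstep : (if p ≠ "" ∧ p ∉ acc then acc ++ [p] else acc) = PySem.Set.add acc p := by
          rw [PySem.Set.add_eq_ite]
          by_cases hm : p ∈ acc
          · simp [hm]
          · simp [hm, he]
        rw [hstep]
        exact ih _

-- B's per-parent scan over the (id, parent) pairs = A's per-key group, for a nonempty parent
theorem pvCollect_eq (l : List (String × List (String × String))) (p : String) (hp : p ≠ "") :
    ((l.map (fun x => (x.1, pvParentOf x.2))).filter (fun x => x.2 == some p)).map (fun x => x.1)
      = ((pvTPairs l).filter (fun q => q.1 == p)).map (fun q => q.2) := by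
  induction l with
  | nil => rfl
  | cons x l ih =>
    rw [List.map_cons, List.filter_cons]
    cases hq : pvParentOf x.2 with
    | none =>
      rw [pvTPairs_cons_none x l hq]
      dsimp only
      simpa using ih
    | some q =>
      by_cases he : q = ""
      · subst he
        rw [pvTPairs_cons_empty x l hq]
        have hb : ((some "" : Option String) == some p) = false :=
          beq_eq_false_iff_ne.mpr (by simpa using Ne.symm hp)
        dsimp only
        rw [if_neg (by simp [hb])]
        exact ih
      · rw [pvTPairs_cons_some x l q hq he, List.filter_cons]
        by_cases h : q = p
        · subst h
          dsimp only
          rw [if_pos (by simp), if_pos (by simp), List.map_cons, List.map_cons, ih]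
        · have hb1 : ((some q : Option String) == some p) = false :=
            beq_eq_false_iff_ne.mpr (by simpa using h)
          have hb2 : (q == p) = false := beq_eq_false_iff_ne.mpr h
          dsimp only
          rw [if_neg (by simp [hb1]), if_neg (by simp [hb2])]
          exact ih

-- every parent collected by B is nonempty
theorem pvTPairs_fst_ne (l : List (String × List (String × String))) (p : String)
    (h : p ∈ (pvTPairs l).map (fun q => q.1)) : p ≠ "" := by
  simp only [pvTPairs, List.mem_map, List.mem_filterMap] at h
  obtain ⟨q, ⟨x, hxl, hx⟩, hq⟩ := h
  subst hq
  revert hx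
  cases pvParentOf x.2 with
  | none => intro hx; cases hx
  | some r =>
    by_cases he : r = ""
    · intro hx
      dsimp only at hx
      rw [if_neg (by simp [he])] at hx
      cases hx
    · intro hx
      dsimp only at hx
      rw [if_pos he] at hx
      cases hx
      exact he

-- the grouping fold from empty, characterised: items = dedup'd keys paired with their groups
theorem pvFold_items (tp : List (String × String)) :
    ((tp.foldl (fun d q => d.modify q.1 [] (fun v => v ++ [q.2]))
        (PySem.Dict.empty : PySem.Dict String (List String))).items)
      = (PySem.Set.ofList (tp.map (fun q => q.1))).map
          (fun p => (p, (tp.filter (fun q => q.1 == p)).map (fun q => q.2))) := by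
  have hkeys : (tp.foldl (fun d q => d.modify q.1 [] (fun v => v ++ [q.2]))
      (PySem.Dict.empty : PySem.Dict String (List String))).keys
      = PySem.Set.ofList (tp.map (fun q => q.1)) := by
    have := PySem.Dict.keys_foldl_modify_key tp (fun q => q.1) ([] : List String)
      (fun _ q => fun v => v ++ [q.2]) PySem.Dict.empty
    simpa [PySem.Set.update_nil_left] using this
  have hnd : (tp.foldl (fun d q => d.modify q.1 [] (fun v => v ++ [q.2]))
      (PySem.Dict.empty : PySem.Dict String (List String))).keys.Nodup :=
    PySem.Dict.nodup_keys_foldl_modify_key tp (fun q => q.1) ([] : List String)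
      (fun _ q => fun v => v ++ [q.2]) PySem.Dict.empty (by simp)
  rw [PySem.Dict.items_eq_map_keys _ hnd ([] : List String), hkeys]
  apply List.map_congr_left
  intro p _
  congr 1
  simpa using PySem.Dict.getD_foldl_modify_append tp PySem.Dict.empty p

-- ===== VERDICT (by name: the statement is the Claim_ definition above) =====
theorem map_chunks_by_parent_spec : Claim_equal_map_chunks_by_parent := by
  unfold Claim_equal_map_chunks_by_parent
  intro ids metadatas _
  unfold Spec_map_chunks_by_parent map_chunks_by_parent map_chunks_by_parent_alt
  dsimp only
  set z := ids.zip metadatas with hz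
  -- split A's fused fold into its three components
  have hfused : ∀ (l : List (String × List (String × String))) (cp : PySem.Dict String (List String))
      (s : PySem.Set String),
      l.foldl pvStepA (cp, pvMv cp, s)
        = (l.foldl pvStepL cp, pvMv (l.foldl pvStepL cp),
           (((l.map (fun x => (x.1, pvParentOf x.2))).filter (fun x => pvTruthy x.2)).map
              (fun x => x.1)).foldl PySem.Set.add s) := by
    intro l
    induction l with
    | nil => intro cp s; rfl
    | cons x l ih =>
      intro cp s
      simp only [List.foldl_cons, List.map_cons, List.filter_cons, pvStep_eq, ih]
      by_cases ht : pvTruthy (pvParentOf x.2) = true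
      · simp [ht]
      · simp only [Bool.not_eq_true] at ht
        simp [ht]
  have hA := hfused z PySem.Dict.empty PySem.Set.empty
  have hMvEmpty : pvMv PySem.Dict.empty = PySem.Dict.empty := rfl
  rw [hMvEmpty] at hA
  rw [hA]
  set tp := pvTPairs z with htp
  have hitems : (z.foldl pvStepL PySem.Dict.empty).items
      = (PySem.Set.ofList (tp.map (fun q => q.1))).map
          (fun p => (p, (tp.filter (fun q => q.1 == p)).map (fun q => q.2))) := by
    rw [pvFoldL_eq z PySem.Dict.empty, ← htp, pvFold_items]
  have hparents : ((z.map (fun x => (x.1, pvParentOf x.2))).foldl (fun acc x =>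
        match x.2 with
        | some p => if p ≠ "" ∧ p ∉ acc then acc ++ [p] else acc
        | none => acc) ([] : List String))
      = PySem.Set.ofList (tp.map (fun q => q.1)) := by
    rw [pvParents_eq z ([] : List String), ← htp, PySem.Set.ofList_eq_foldl]
  have hcp : ((PySem.Set.ofList (tp.map (fun q => q.1))).map (fun p =>
        (p, ((z.map (fun x => (x.1, pvParentOf x.2))).filter (fun x => x.2 == some p)).map
          (fun x => x.1))))
      = (PySem.Set.ofList (tp.map (fun q => q.1))).map
          (fun p => (p, (tp.filter (fun q => q.1 == p)).map (fun q => q.2))) := by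
    apply List.map_congr_left
    intro p hp
    have hpne : p ≠ "" := pvTPairs_fst_ne z p (by
      have := (PySem.Set.mem_ofList (xs := tp.map (fun q => q.1)) (y := p)).mp hp
      simpa [htp] using this)
    rw [pvCollect_eq z p hpne, ← htp]
  have hmvitems : (pvMv (List.foldl pvStepL PySem.Dict.empty z)).items
      = ((List.foldl pvStepL PySem.Dict.empty z).items).map
          (fun kv => (kv.1, PySem.Set.ofList kv.2)) := rfl
  dsimp only
  rw [hmvitems, hitems, hparents, hcp, List.map_map]
  refine congrArg₂ Prod.mk rfl (congrArg₂ Prod.mk ?_ ?_)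
  · -- chunk_ids_by_parent
    apply List.map_congr_left
    intro p hp
    simp only [Function.comp_def]
    have hnd : (PySem.Dict.mk ((PySem.Set.ofList (tp.map (fun q => q.1))).map
        (fun p => (p, (tp.filter (fun q => q.1 == p)).map (fun q => q.2))))).keys.Nodup := by
      show (((PySem.Set.ofList (tp.map (fun q => q.1))).map
        (fun p => (p, (tp.filter (fun q => q.1 == p)).map (fun q => q.2)))).map (fun kv => kv.1)).Nodup
      simp only [List.map_map, Function.comp_def, List.map_id']
      exact PySem.Set.nodup_ofList (tp.map (fun q => q.1))
    have hmem : (p, (tp.filter (fun q => q.1 == p)).map (fun q => q.2))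
        ∈ ((PySem.Set.ofList (tp.map (fun q => q.1))).map
            (fun p => (p, (tp.filter (fun q => q.1 == p)).map (fun q => q.2)))) :=
      List.mem_map.mpr ⟨p, hp, rfl⟩
    rw [PySem.Dict.getD_of_mem_items _ hmem hnd ([] : List String)]
  · -- all_chunk_ids
    rw [PySem.Set.ofList_eq_foldl]
    rfl
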